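-- pv_equiv track=rewrite | github.com/milicar7/master-thesis | csv_to_ddl/normalization/third_normal_form.py | _check_functional_dependency
-- ===== SOURCE A (Python) =====
-- from typing import List, Optional, Dict
--
-- def _check_functional_dependency(rows: List[List[str]], det_idx: int, dep_idx: int) -> bool:
--     """Check if column at dep_idx functionally depends on column at det_idx"""
--     dependency_map = {}
--     det_values_seen = set()
--
--     for row in rows:
--         if len(row) <= max(det_idx, dep_idx):
--             continue
--
--         det_value = row[det_idx].strip()
--         dep_value = row[dep_idx].strip()
--
--         det_values_seen.add(det_value)
--
--         if det_value in dependency_map: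
--             if dependency_map[det_value] != dep_value:
--                 return False
--         else:
--             dependency_map[det_value] = dep_value
--
--     return 1 < len(det_values_seen) == len(dependency_map)
-- ===== SOURCE B (Python) =====
-- from typing import List
--
--
-- def _check_functional_dependency(rows: List[List[str]], det_idx: int, dep_idx: int) -> bool:
--     """Check if column at dep_idx functionally depends on column at det_idx.
--
--     Cardinality argument over distinct pairs: collect the distinct
--     (determinant, dependent) pairs of the usable rows; the dependency holds
--     iff there is more than one distinct determinant and the number of
--     distinct pairs equals the number of distinct determinants (i.e. no
--     determinant occurs in two different pairs).
--     """
--     pairs = {(row[det_idx].strip(), row[dep_idx].strip())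
--              for row in rows if len(row) > max(det_idx, dep_idx)}
--     determinants = {det for det, _ in pairs}
--     return len(determinants) > 1 and len(pairs) == len(determinants)
-- ===== Notes on version B (the rewrite author's own statement) =====
-- stated objective: alternative
-- what changed: Replaces A's stateful single pass (a determinant->dependent map checked for conflicts with early exit, plus a seen-set size comparison) by a cardinality argument: collect the set of distinct (determinant, dependent) pairs, project it to the set of distinct determinants, and return len(determinants) > 1 and len(pairs) == len(determinants).
import Mathlib
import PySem

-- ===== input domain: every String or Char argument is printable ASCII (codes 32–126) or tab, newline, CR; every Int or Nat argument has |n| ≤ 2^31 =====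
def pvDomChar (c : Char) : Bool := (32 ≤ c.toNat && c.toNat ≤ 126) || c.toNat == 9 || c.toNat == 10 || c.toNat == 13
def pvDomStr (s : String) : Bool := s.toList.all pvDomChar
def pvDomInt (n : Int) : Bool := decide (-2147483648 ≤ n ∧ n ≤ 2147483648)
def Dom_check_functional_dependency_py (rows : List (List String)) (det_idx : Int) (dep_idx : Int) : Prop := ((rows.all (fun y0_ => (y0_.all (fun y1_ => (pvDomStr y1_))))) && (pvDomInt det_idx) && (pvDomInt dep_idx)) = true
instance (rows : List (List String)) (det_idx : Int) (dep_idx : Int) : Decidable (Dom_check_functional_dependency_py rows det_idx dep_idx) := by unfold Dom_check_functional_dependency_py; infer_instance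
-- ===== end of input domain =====

-- B replaces A's stateful early-exit pass (map + seen-set) by a cardinality argument over the
-- set of distinct (determinant, dependent) pairs (objective: alternative algorithm, same cost).
-- ===== PORT A =====
-- the loop of A: dependency_map + det_values_seen, early return False on conflict;
-- row[det_idx]/row[dep_idx] as pyGetD (total form) — exact under Pre_ below (indices in range)
def pvGoA (det_idx dep_idx : Int) : List (List String) → PySem.Dict String String → PySem.Set String → Bool
  | [], dm, seen =>
      -- return 1 < len(det_values_seen) == len(dependency_map)  (chained comparison)
      decide (1 < PySem.Set.len seen) && decide (PySem.Set.len seen = (PySem.Dict.size dm : Int))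
  | row :: rest, dm, seen =>
      if (row.length : Int) ≤ max det_idx dep_idx then pvGoA det_idx dep_idx rest dm seen
      else
        let det_value := PySem.Str.strip (PySem.List.pyGetD row det_idx "")
        let dep_value := PySem.Str.strip (PySem.List.pyGetD row dep_idx "")
        let seen' := PySem.Set.add seen det_value
        match dm.get? det_value with
        | some v => if v ≠ dep_value then false else pvGoA det_idx dep_idx rest dm seen'
        | none => pvGoA det_idx dep_idx rest (dm.insert det_value dep_value) seen'

def check_functional_dependency_py (rows : List (List String)) (det_idx : Int) (dep_idx : Int) : Bool :=
  pvGoA det_idx dep_idx rows PySem.Dict.empty PySem.Set.empty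

-- ===== PORT B =====
-- pairs = {(row[det_idx].strip(), row[dep_idx].strip()) for row in rows if len(row) > max(...)}
-- determinants = {det for det, _ in pairs}
-- return len(determinants) > 1 and len(pairs) == len(determinants)
def check_functional_dependency_py_alt (rows : List (List String)) (det_idx : Int) (dep_idx : Int) : Bool :=
  let pairs : PySem.Set (String × String) :=
    rows.foldl (fun s row =>
      if max det_idx dep_idx < (row.length : Int) then
        PySem.Set.add s (PySem.Str.strip (PySem.List.pyGetD row det_idx ""),
                         PySem.Str.strip (PySem.List.pyGetD row dep_idx ""))
      else s) PySem.Set.empty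
  let determinants : PySem.Set String := PySem.Set.ofList (pairs.map Prod.fst)
  decide (1 < PySem.Set.len determinants) && decide (PySem.Set.len pairs = PySem.Set.len determinants)

-- ===== PRECONDITION & SPEC =====
-- Pre_ excludes inputs containing a row that passes the length filter but whose (negative) index
-- access is out of range: there Python raises IndexError — A may return False early before reaching
-- such a row, while B (which processes every row) raises.
def Pre_check_functional_dependency_py (rows : List (List String)) (det_idx : Int) (dep_idx : Int) : Prop :=
  ∀ row ∈ rows, max det_idx dep_idx < (row.length : Int) →
    PySem.Raise.InRange row.length det_idx ∧ PySem.Raise.InRange row.length dep_idx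
instance (rows : List (List String)) (det_idx : Int) (dep_idx : Int) : Decidable (Pre_check_functional_dependency_py rows det_idx dep_idx) := by unfold Pre_check_functional_dependency_py; infer_instance
def pvWitness_check_functional_dependency_py : List (List String) × Int × Int :=
  ([["a", "x"], ["b", "x"], ["a", "x "]], 0, 1)
def Spec_check_functional_dependency_py (rows : List (List String)) (det_idx : Int) (dep_idx : Int) (out : Bool) : Prop := out = check_functional_dependency_py_alt rows det_idx dep_idx
instance (rows : List (List String)) (det_idx : Int) (dep_idx : Int) (out : Bool) : Decidable (Spec_check_functional_dependency_py rows det_idx dep_idx out) := by unfold Spec_check_functional_dependency_py; infer_instance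

-- ===== CLAIM (what is proved, stated in full; the proofs are below) =====
def Claim_equal_check_functional_dependency_py : Prop := ∀ (rows : List (List String)) (det_idx : Int) (dep_idx : Int), Dom_check_functional_dependency_py rows det_idx dep_idx → Pre_check_functional_dependency_py rows det_idx dep_idx → Spec_check_functional_dependency_py rows det_idx dep_idx (check_functional_dependency_py rows det_idx dep_idx)

-- ===== LEMMAS AND PROOFS =====

-- B's final validation, as a function of the pair set (rfl-equal to the tail of the port)
def pvCheck (P : PySem.Set (String × String)) : Bool :=
  decide (1 < PySem.Set.len (PySem.Set.ofList (P.map Prod.fst))) &&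
  decide (PySem.Set.len P = PySem.Set.len (PySem.Set.ofList (P.map Prod.fst)))

-- B's grouping step
def pvStep (det_idx dep_idx : Int) (s : PySem.Set (String × String)) (row : List String) : PySem.Set (String × String) :=
  if max det_idx dep_idx < (row.length : Int) then
    PySem.Set.add s (PySem.Str.strip (PySem.List.pyGetD row det_idx ""),
                     PySem.Str.strip (PySem.List.pyGetD row dep_idx ""))
  else s

theorem pvAlt_eq (rows : List (List String)) (det_idx dep_idx : Int) :
    check_functional_dependency_py_alt rows det_idx dep_idx
      = pvCheck (rows.foldl (pvStep det_idx dep_idx) PySem.Set.empty) := rfl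

-- projecting a duplicate-first list to its determinant set loses at least one element
theorem pvLenLt (P : List (String × String)) (hnd : P.Nodup)
    (a b : String × String) (ha : a ∈ P) (hb : b ∈ P) (hne : a ≠ b) (hfst : a.1 = b.1) :
    (PySem.Set.ofList (P.map Prod.fst)).length < P.length := by
  have h1 : (PySem.Set.ofList (P.map Prod.fst)).toFinset = (P.map Prod.fst).toFinset := by
    apply Finset.ext; intro x
    simp [List.mem_toFinset, PySem.Set.mem_ofList]
  have h2 : (PySem.Set.ofList (P.map Prod.fst)).length
      = (P.map Prod.fst).toFinset.card := by
    rw [← h1, List.toFinset_card_of_nodup (PySem.Set.nodup_ofList _)]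
  have h3 : (P.map Prod.fst).toFinset = P.toFinset.image Prod.fst := by
    apply Finset.ext; intro x; simp
  rw [h2, ← List.toFinset_card_of_nodup hnd, h3]
  refine lt_of_le_of_ne (Finset.card_image_le) ?_
  intro hcard
  have hinj := Finset.card_image_iff.mp hcard
  exact hne (hinj (List.mem_toFinset.mpr ha) (List.mem_toFinset.mpr hb) hfst)

-- once the pair set holds two pairs with the same determinant, B's validation fails
theorem pvBad (det_idx dep_idx : Int) :
    ∀ (rows : List (List String)) (P : PySem.Set (String × String)),
      P.Nodup → (∃ a b, a ∈ P ∧ b ∈ P ∧ a ≠ b ∧ a.1 = b.1) →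
      pvCheck (rows.foldl (pvStep det_idx dep_idx) P) = false := by
  intro rows
  induction rows with
  | nil =>
    intro P hnd ⟨a, b, ha, hb, hne, hf⟩
    have := pvLenLt P hnd a b ha hb hne hf
    simp only [List.foldl_nil, pvCheck, Bool.and_eq_false_iff]
    right
    simp [PySem.Set.len]
    omega
  | cons row rest ih =>
    intro P hnd hab
    rw [List.foldl_cons]
    apply ih
    · unfold pvStep
      split_ifs
      · exact PySem.Set.nodup_add _ _ hnd
      · exact hnd
    · obtain ⟨a, b, ha, hb, hne, hf⟩ := hab
      refine ⟨a, b, ?_, ?_, hne, hf⟩ <;>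
        · unfold pvStep
          split_ifs
          · exact (PySem.Set.mem_add _ _ _).mpr (Or.inl (by assumption))
          · assumption

-- main invariant: A's loop from state (dm, dm.keys) agrees with B run from the pair set dm.items
theorem pvMain (det_idx dep_idx : Int) :
    ∀ (rows : List (List String)) (dm : PySem.Dict String String),
      dm.keys.Nodup →
      (∀ row ∈ rows, max det_idx dep_idx < (row.length : Int) →
        PySem.Raise.InRange row.length det_idx ∧ PySem.Raise.InRange row.length dep_idx) →
      pvGoA det_idx dep_idx rows dm dm.keys
        = pvCheck (rows.foldl (pvStep det_idx dep_idx) dm.items) := by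
  intro rows
  induction rows with
  | nil =>
    intro dm hnd _
    have hkeys : dm.items.map Prod.fst = dm.keys := rfl
    have hlen : dm.keys.length = dm.items.length := by
      rw [← hkeys]; simp
    simp only [pvGoA, List.foldl_nil, pvCheck, hkeys,
      PySem.Set.ofList_eq_self_of_nodup dm.keys hnd]
    simp [PySem.Set.len, PySem.Dict.size, hlen]
  | cons row rest ih =>
    intro dm hnd hpre
    have hitems_nd : dm.items.Nodup := by
      have : (dm.items.map Prod.fst).Nodup := hnd
      exact this.of_map
    have hprer : ∀ r ∈ rest, max det_idx dep_idx < (r.length : Int) →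
        PySem.Raise.InRange r.length det_idx ∧ PySem.Raise.InRange r.length dep_idx := by
      intro r hr; exact hpre r (List.mem_cons_of_mem _ hr)
    rw [List.foldl_cons]
    rw [show pvGoA det_idx dep_idx (row :: rest) dm dm.keys
        = (if (row.length : Int) ≤ max det_idx dep_idx then pvGoA det_idx dep_idx rest dm dm.keys
           else
             match dm.get? (PySem.Str.strip (PySem.List.pyGetD row det_idx "")) with
             | some v =>
                 if v ≠ PySem.Str.strip (PySem.List.pyGetD row dep_idx "") then false
                 else pvGoA det_idx dep_idx rest dm
                   (PySem.Set.add dm.keys (PySem.Str.strip (PySem.List.pyGetD row det_idx "")))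
             | none => pvGoA det_idx dep_idx rest
                   (dm.insert (PySem.Str.strip (PySem.List.pyGetD row det_idx ""))
                     (PySem.Str.strip (PySem.List.pyGetD row dep_idx "")))
                   (PySem.Set.add dm.keys (PySem.Str.strip (PySem.List.pyGetD row det_idx "")))) from rfl]
    split_ifs with hskip
    · rw [show pvStep det_idx dep_idx dm.items row = dm.items from by
        unfold pvStep; rw [if_neg (not_lt.mpr hskip)]]
      exact ih dm hnd hprer
    · have hlt : max det_idx dep_idx < (row.length : Int) := lt_of_not_ge hskip
      set d := PySem.Str.strip (PySem.List.pyGetD row det_idx "") with hd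
      set p := PySem.Str.strip (PySem.List.pyGetD row dep_idx "") with hp
      have hstep : pvStep det_idx dep_idx dm.items row = PySem.Set.add dm.items (d, p) := by
        unfold pvStep; rw [if_pos hlt]
      rw [hstep]
      cases hget : dm.get? d with
      | some v =>
        show (if v ≠ p then false else pvGoA det_idx dep_idx rest dm (PySem.Set.add dm.keys d)) = _
        have hmemk : d ∈ dm.keys := by
          rw [← PySem.Dict.contains_iff_mem_keys, PySem.Dict.contains_eq_isSome_get?, hget]; rfl
        have hseen : PySem.Set.add dm.keys d = dm.keys := by
          simp [PySem.Set.add, PySem.Set.contains, hmemk]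
        have hdv : (d, v) ∈ dm.items := PySem.Dict.mem_items_of_get?_eq_some dm hget
        by_cases hvp : v = p
        · -- consistent re-occurrence: the pair is already present, both sides keep their state
          have hmem : (d, p) ∈ dm.items := hvp ▸ hdv
          have hadd : PySem.Set.add dm.items (d, p) = dm.items := by
            simp [PySem.Set.add, PySem.Set.contains, hmem]
          rw [if_neg (by simp [hvp]), hseen, hadd]
          exact ih dm hnd hprer
        · -- conflict: A returns False; B's pair set now has two pairs with determinant d
          rw [if_pos (by simpa using hvp)]
          have hnotmem : (d, p) ∉ dm.items := by
            intro hmem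
            have := PySem.Dict.get?_of_mem_items dm hmem hnd
            rw [hget] at this
            exact hvp (by injection this)
          have hadd : PySem.Set.add dm.items (d, p) = dm.items ++ [(d, p)] := by
            simp only [PySem.Set.add]
            rw [if_neg (by
              intro hc
              exact hnotmem ((PySem.Set.contains_iff _ _).mp hc))]
          rw [hadd]
          refine (pvBad det_idx dep_idx rest _ ?_ ?_).symm
          · exact List.Nodup.append hitems_nd (List.nodup_singleton _)
              (by simpa using fun h => (hnotmem h).elim)
          · exact ⟨(d, v), (d, p), by simp [hdv], by simp, by simp [hvp], rfl⟩
      | none =>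
        show pvGoA det_idx dep_idx rest (dm.insert d p) (PySem.Set.add dm.keys d) = _
        have hcont : dm.contains d = false := by
          rw [PySem.Dict.contains_eq_isSome_get?, hget]; rfl
        have hnotmemk : d ∉ dm.keys := fun hmem =>
          by rw [(PySem.Dict.contains_iff_mem_keys dm d).mpr hmem] at hcont; cases hcont
        have hseen : PySem.Set.add dm.keys d = (dm.insert d p).keys := by
          rw [PySem.Dict.keys_insert_of_not_contains _ _ hcont]
          simp [PySem.Set.add, PySem.Set.contains, hnotmemk]
        have hnotmem : (d, p) ∉ dm.items := fun hmem =>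
          hnotmemk (by exact List.mem_map.mpr ⟨(d, p), hmem, rfl⟩)
        have hadd : PySem.Set.add dm.items (d, p) = (dm.insert d p).items := by
          rw [PySem.Dict.items_insert, if_neg (by simp [hcont])]
          simp only [PySem.Set.add]
          rw [if_neg (by
            intro hc
            exact hnotmem ((PySem.Set.contains_iff _ _).mp hc))]
        rw [hseen, hadd]
        exact ih (dm.insert d p) (PySem.Dict.nodup_keys_insert dm d p hnd) hprer

-- ===== VERDICT (by name: the statement is the Claim_ definition above) =====
theorem check_functional_dependency_py_spec : Claim_equal_check_functional_dependency_py := by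
  intro rows det_idx dep_idx _ hpre
  show check_functional_dependency_py rows det_idx dep_idx = check_functional_dependency_py_alt rows det_idx dep_idx
  rw [pvAlt_eq]
  unfold check_functional_dependency_py
  have h0 : (PySem.Dict.empty : PySem.Dict String String).keys = PySem.Set.empty := rfl
  rw [← h0]
  rw [pvMain det_idx dep_idx rows PySem.Dict.empty (by simp [PySem.Dict.keys, PySem.Dict.empty]) hpre]
  rfl
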